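-- pv_equiv track=rewrite | github.com/xzr159357/FP-MAX | FP-MAX.py | getSortHead
-- ===== SOURCE A (Python) =====
-- from functools import reduce
-- from collections import Counter, defaultdict
-- from typing import DefaultDict, Dict, List, Tuple
--
-- def getSortHead(itemsets: List[List[str]], n_sup: int):
--     counter = Counter(reduce(lambda x, y: x + y, itemsets))
--     item_tables = sorted(counter, key=lambda x: counter[x], reverse=True)
--     head_count = [item for item in item_tables if counter[item] >= n_sup]
--     head_sort: Dict = {}
--     for i in range(len(head_count)):
--         # head_sort.update(head_count[i], i)
--         head_sort[head_count[i]] = i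
--
--     return head_count, head_sort
-- ===== SOURCE B (Python) =====
-- def getSortHead(itemsets, n_sup):
--     counts = {}
--     for itemset in itemsets:
--         for item in itemset:
--             counts[item] = counts.get(item, 0) + 1
--     buckets = {}
--     for item, c in counts.items():
--         buckets.setdefault(c, []).append(item)
--     head_count = []
--     for c in sorted(buckets, reverse=True):
--         if c >= n_sup:
--             head_count.extend(buckets[c])
--     head_sort = {item: i for i, item in enumerate(head_count)}
--     return head_count, head_sort
-- ===== Notes on version B (the rewrite author's own statement) =====
-- stated objective: faster
-- what changed: B counts items with one explicit dict loop (no quadratic reduce(+) flattening) and replaces A's comparison sort of the Counter keys by a counting sort: frequency buckets concatenated in descending frequency order, with whole buckets kept or dropped by n_sup, and head_sort built by enumerate instead of an index loop.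
-- outside the precondition, e.g. on getSortHead([], 1): A raises TypeError, B returns ([], {})
import Mathlib
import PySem

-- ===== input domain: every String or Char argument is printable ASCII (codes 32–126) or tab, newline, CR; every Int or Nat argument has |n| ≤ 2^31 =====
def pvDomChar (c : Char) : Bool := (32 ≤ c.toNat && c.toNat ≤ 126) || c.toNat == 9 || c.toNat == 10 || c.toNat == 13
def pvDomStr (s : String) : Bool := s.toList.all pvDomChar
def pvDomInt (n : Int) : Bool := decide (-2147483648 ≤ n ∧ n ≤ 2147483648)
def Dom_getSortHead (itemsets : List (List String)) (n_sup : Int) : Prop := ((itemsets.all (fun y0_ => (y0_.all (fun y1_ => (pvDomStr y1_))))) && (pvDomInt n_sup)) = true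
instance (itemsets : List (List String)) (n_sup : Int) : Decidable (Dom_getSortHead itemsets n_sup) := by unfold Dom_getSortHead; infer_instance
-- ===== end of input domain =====

-- B avoids A's quadratic reduce(+) flattening (one counting loop) and replaces A's comparison
-- sort of the Counter's keys by a counting sort (frequency buckets concatenated in descending
-- frequency order, whole buckets filtered by n_sup); equal output, measurably faster.
-- ===== PORT A =====
-- reduce(lambda x, y: x + y, itemsets): TypeError on itemsets = [] (excluded by Pre_)
def pvReduceConcat (itemsets : List (List String)) : List String :=
  match itemsets with
  | [] => []
  | h :: t => t.foldl (· ++ ·) h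

def getSortHead (itemsets : List (List String)) (n_sup : Int) : List String × (List (String × Int)) :=
  let flat : List String := pvReduceConcat itemsets
  let counter : PySem.Dict String Int := PySem.Dict.counter flat
  let item_tables : List String := PySem.List.sorted counter.keys (fun x => counter.getD x 0) true
  let head_count : List String := item_tables.filter (fun item => counter.getD item 0 ≥ n_sup)
  let head_sort : PySem.Dict String Int :=
    (PySem.List.pyRange 0 (head_count.length : Int)).foldl
      (fun d i => match PySem.List.pyGet? head_count i with
        | some it => d.insert it i
        | none => d)  -- none unreachable: i ranges over range(len(head_count))
      PySem.Dict.empty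
  (head_count, head_sort.items)

-- ===== PORT B =====
def getSortHead_alt (itemsets : List (List String)) (n_sup : Int) : List String × (List (String × Int)) :=
  let counts : PySem.Dict String Int :=
    itemsets.foldl (fun d s => s.foldl (fun d it => d.insert it (d.getD it 0 + 1)) d) PySem.Dict.empty
  let buckets : PySem.Dict Int (List String) :=
    counts.items.foldl (fun b p => b.modify p.2 [] (· ++ [p.1])) PySem.Dict.empty
  let head_count : List String :=
    (PySem.List.sorted buckets.keys (fun x => x) true).foldl
      (fun acc c => if c ≥ n_sup then acc ++ buckets.getD c [] else acc) []
      -- buckets[c]: exact as getD, c is always a key of buckets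
  let head_sort : PySem.Dict String Int :=
    (PySem.List.enumerate head_count 0).foldl (fun d p => d.insert p.2 p.1) PySem.Dict.empty
  (head_count, head_sort.items)

-- ===== PRECONDITION & SPEC =====
-- Pre_ excludes only the empty itemsets list, on which A's reduce() raises TypeError
-- (B returns ([], []) there).
def Pre_getSortHead (itemsets : List (List String)) (n_sup : Int) : Prop := itemsets ≠ []
instance (itemsets : List (List String)) (n_sup : Int) : Decidable (Pre_getSortHead itemsets n_sup) := by unfold Pre_getSortHead; infer_instance
def pvWitness_getSortHead : List (List String) × Int := ([["a", "b"], ["b"]], 1)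

def Spec_getSortHead (itemsets : List (List String)) (n_sup : Int) (out : List String × (List (String × Int))) : Prop := out = getSortHead_alt itemsets n_sup
instance (itemsets : List (List String)) (n_sup : Int) (out : List String × (List (String × Int))) : Decidable (Spec_getSortHead itemsets n_sup out) := by unfold Spec_getSortHead; infer_instance

-- ===== CLAIM (what is proved, stated in full; the proofs are below) =====
def Claim_equal_getSortHead : Prop := ∀ (itemsets : List (List String)) (n_sup : Int), Dom_getSortHead itemsets n_sup → Pre_getSortHead itemsets n_sup → Spec_getSortHead itemsets n_sup (getSortHead itemsets n_sup)

-- ===== LEMMAS AND PROOFS =====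

-- reduce(+) over a nonempty list is the flattening
theorem pv_foldl_append_eq_flatMap_id (t : List (List String)) : ∀ (h : List String),
    t.foldl (· ++ ·) h = (h :: t).flatMap id := by
  induction t with
  | nil => intro h; simp
  | cons a t ih =>
      intro h
      simp only [List.foldl_cons, ih (h ++ a), List.flatMap_cons, id_def]
      simp [List.append_assoc]

-- the nested counting loop is the counting loop over the flattening
theorem pv_nested_foldl_eq_flat (its : List (List String)) : ∀ (d : PySem.Dict String Int),
    its.foldl (fun d s => s.foldl (fun d it => d.insert it (d.getD it 0 + 1)) d) d
      = (its.flatMap id).foldl (fun d it => d.insert it (d.getD it 0 + 1)) d := by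
  induction its with
  | nil => intro d; simp
  | cons a t ih => intro d; simp [List.foldl_append, ih]

theorem pv_insertBy_append_left {α : Type} (b : α → α → Bool) (x : α) (l1 l2 : List α)
    (h : ∀ y ∈ l1, b x y = false) :
    PySem.List.insertBy b x (l1 ++ l2) = l1 ++ PySem.List.insertBy b x l2 := by
  induction l1 with
  | nil => simp
  | cons y ys ih =>
      have hy : b x y = false := h y (by simp)
      show (if b x y = true then _ else _) = _
      rw [hy]
      simp only [Bool.false_eq_true, if_false, List.cons_append, List.append_eq]
      rw [ih (fun z hz => h z (by simp [hz]))]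

theorem pv_insertBy_all_true {α : Type} (b : α → α → Bool) (x : α) (l : List α)
    (h : ∀ y ∈ l, b x y = true) :
    PySem.List.insertBy b x l = x :: l := by
  cases l with
  | nil => rfl
  | cons y ys =>
      show (if b x y = true then _ else _) = _
      rw [h y (by simp)]
      simp

-- stable reverse sort = concatenation of key-buckets in strictly descending key order
theorem pv_sorted_rev_eq_flatMap (k : String → Int) (D : List Int)
    (hD : D.Pairwise (fun a b => b < a)) :
    ∀ (xs : List String), (∀ x ∈ xs, k x ∈ D) →
    PySem.List.sorted xs k true = D.flatMap (fun c => xs.filter (fun x => k x == c)) := by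
  intro xs
  induction xs using List.reverseRecOn with
  | nil => intro _; simp [PySem.List.sorted]
  | append_singleton xs x ih =>
      intro hmem
      have hih := ih (fun y hy => hmem y (by simp [hy]))
      rw [PySem.List.sorted_rev_eq_foldl_insertBy] at hih ⊢
      rw [List.foldl_append]
      simp only [List.foldl_cons, List.foldl_nil]
      rw [hih]
      obtain ⟨D1, D2, hsplit⟩ := List.append_of_mem (hmem x (by simp))
      subst hsplit
      rw [List.pairwise_append] at hD
      obtain ⟨h1, h2, h12⟩ := hD
      rw [List.pairwise_cons] at h2
      obtain ⟨hlt2, _⟩ := h2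
      have hgt1 : ∀ c ∈ D1, k x < c := fun c hc => h12 c hc (k x) (by simp)
      -- bucket shapes on the right
      have hbkt1 : ∀ c ∈ D1, (xs ++ [x]).filter (fun y => k y == c) = xs.filter (fun y => k y == c) := by
        intro c hc
        rw [List.filter_append]
        have : (k x == c) = false := by
          simp only [beq_eq_false_iff_ne]; exact ne_of_lt (hgt1 c hc)
        simp [List.filter, this]
      have hbkt2 : ∀ c ∈ D2, (xs ++ [x]).filter (fun y => k y == c) = xs.filter (fun y => k y == c) := by
        intro c hc
        rw [List.filter_append]
        have : (k x == c) = false := by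
          simp only [beq_eq_false_iff_ne]; exact ne_of_gt (hlt2 c hc)
        simp [List.filter, this]
      have hbktx : (xs ++ [x]).filter (fun y => k y == k x) = xs.filter (fun y => k y == k x) ++ [x] := by
        rw [List.filter_append]; simp [List.filter]
      have hleft : ∀ y ∈ (D1.flatMap (fun c => xs.filter (fun x => k x == c)))
          ++ xs.filter (fun y => k y == k x), (fun a b => decide (k b < k a)) x y = false := by
        intro y hy
        rw [List.mem_append] at hy
        rcases hy with hy | hy
        · simp only [List.mem_flatMap] at hy
          obtain ⟨c, hc, hyc⟩ := hy
          have hkc : k y = c := by simpa using (List.of_mem_filter hyc)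
          simp only [decide_eq_false_iff_not]
          rw [hkc]; exact not_lt_of_gt (hgt1 c hc)
        · have hkc : k y = k x := by simpa using (List.of_mem_filter hy)
          simp [hkc]
      have hright : ∀ y ∈ D2.flatMap (fun c => xs.filter (fun x => k x == c)),
          (fun a b => decide (k b < k a)) x y = true := by
        intro y hy
        simp only [List.mem_flatMap] at hy
        obtain ⟨c, hc, hyc⟩ := hy
        have hkc : k y = c := by simpa using (List.of_mem_filter hyc)
        simp only [decide_eq_true_eq]
        rw [hkc]; exact hlt2 c hc
      rw [List.flatMap_append, List.flatMap_cons, List.flatMap_append, List.flatMap_cons]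
      rw [List.flatMap_congr (fun c hc => hbkt1 c hc), List.flatMap_congr (fun c hc => hbkt2 c hc), hbktx]
      conv_lhs => rw [← List.append_assoc]
      rw [pv_insertBy_append_left _ _ _ _ hleft, pv_insertBy_all_true _ _ _ hright]
      simp [List.append_assoc]

-- keeping whole buckets with key ≥ n_sup = filtering the concatenation by count ≥ n_sup
theorem pv_filter_flatMap (k : String → Int) (n_sup : Int) (S : List String) :
    ∀ (D : List Int),
    (D.filter (fun c => c ≥ n_sup)).flatMap (fun c => S.filter (fun x => k x == c))
      = (D.flatMap (fun c => S.filter (fun x => k x == c))).filter (fun x => k x ≥ n_sup) := by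
  intro D
  induction D with
  | nil => simp
  | cons c D ih =>
      rw [List.flatMap_cons, List.filter_append, ← ih, List.filter_cons]
      have hbucket : (S.filter (fun x => k x == c)).filter (fun x => decide (k x ≥ n_sup))
          = if (decide (c ≥ n_sup)) = true then S.filter (fun x => k x == c) else [] := by
        split_ifs with hc
        · apply List.filter_eq_self.mpr
          intro y hy
          have : k y = c := by simpa using (List.of_mem_filter hy)
          simpa [this] using hc
        · apply List.filter_eq_nil_iff.mpr
          intro y hy
          have : k y = c := by simpa using (List.of_mem_filter hy)
          simpa [this] using hc
      split_ifs with hc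
      · rw [List.flatMap_cons]; congr 1; rw [hbucket]; simp [hc]
      · rw [hbucket]; simp [hc]

-- the index loop over range(len(l)) builds the same dict as the enumerate loop
theorem pv_range_fold_eq_enum_fold (full : List String) :
    ∀ (n off : Nat) (d : PySem.Dict String Int), off + n = full.length →
    (PySem.List.pyRange (off : Int) (full.length : Int)).foldl
      (fun d i => match PySem.List.pyGet? full i with
        | some it => d.insert it i
        | none => d) d
      = (PySem.List.enumerate (full.drop off) (off : Int)).foldl (fun d p => d.insert p.2 p.1) d := by
  intro n
  induction n with
  | zero =>
      intro off d h
      have hoff : (off : Int) = (full.length : Int) := by omega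
      rw [hoff]
      have h1 : PySem.List.pyRange (full.length : Int) (full.length : Int) = [] := by
        simp [PySem.List.pyRange]
      have h2 : full.drop off = [] := List.drop_eq_nil_of_le (by omega)
      rw [h1, h2]
      rfl
  | succ m ih =>
      intro off d h
      have hlt : off < full.length := by omega
      rw [PySem.List.pyRange_one_cons (by exact_mod_cast hlt)]
      have hdrop : full.drop off = full[off] :: full.drop (off + 1) :=
        (List.getElem_cons_drop hlt).symm
      rw [hdrop]
      simp only [List.foldl_cons]
      have hget : PySem.List.pyGet? full (off : Int) = some full[off] := by
        rw [PySem.List.pyGet?_natCast]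
        exact List.getElem?_eq_getElem hlt
      rw [hget]
      have hcast : ((off : Int) + 1) = ((off + 1 : Nat) : Int) := by push_cast; ring
      rw [hcast]
      exact ih (off + 1) _ (by omega)

-- ===== VERDICT (by name: the statement is the Claim_ definition above) =====
theorem getSortHead_spec : Claim_equal_getSortHead := by
  intro itemsets n_sup _ hpre
  unfold Spec_getSortHead
  obtain ⟨h, t, rfl⟩ : ∃ h t, itemsets = h :: t := by
    cases itemsets with
    | nil => exact absurd rfl hpre
    | cons h t => exact ⟨h, t, rfl⟩
  simp only [getSortHead, getSortHead_alt]
  have hflatA : pvReduceConcat (h :: t) = (h :: t).flatMap id := pv_foldl_append_eq_flatMap_id t h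
  rw [hflatA]
  set flat : List String := (h :: t).flatMap id with hflatdef
  set cnt : String → Int := fun x => ((flat.count x : Int)) with hcntdef
  set S : List String := PySem.Set.ofList flat with hSdef
  set C : List Int := PySem.Set.ofList (S.map cnt) with hCdef
  set D : List Int := PySem.List.sorted C (fun x => x) true with hDdef
  -- B's counting loop is Counter(flat)
  have hcounts : (h :: t).foldl (fun d s => s.foldl (fun d it => d.insert it (d.getD it 0 + 1)) d) PySem.Dict.empty
      = PySem.Dict.counter flat := by
    rw [pv_nested_foldl_eq_flat, ← hflatdef, PySem.Dict.foldl_insert_getD_add_one_eq_counter]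
  rw [hcounts]
  -- B's bucket dict
  set buckets : PySem.Dict Int (List String) :=
    (PySem.Dict.counter flat).items.foldl (fun b p => b.modify p.2 [] (· ++ [p.1])) PySem.Dict.empty with hbdef
  have hswap : buckets = ((PySem.Dict.counter flat).items.map Prod.swap).foldl
      (fun b p => b.modify p.1 [] (· ++ [p.2])) PySem.Dict.empty := by
    rw [List.foldl_map]
    rfl
  have hswapitems : (PySem.Dict.counter flat).items.map Prod.swap = S.map (fun k => (cnt k, k)) := by
    rw [PySem.Dict.items_counter, List.map_map]
    rfl
  have hkeys : buckets.keys = C := by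
    rw [hswap, hswapitems,
      PySem.Dict.keys_foldl_modify_key (List.map (fun k => (cnt k, k)) S)
        (fun p : Int × String => p.1) ([] : List String)
        (fun d p => fun x => x ++ [p.2]) PySem.Dict.empty]
    rw [PySem.Dict.keys_empty, List.map_map]
    rfl
  have hbkt : ∀ c, buckets.getD c [] = S.filter (fun x => cnt x == c) := by
    intro c
    rw [hswap, hswapitems, PySem.Dict.getD_foldl_modify_append, PySem.Dict.getD_empty]
    rw [List.filter_map, List.map_map]
    simp [Function.comp_def]
  -- the descending distinct-count list
  have hnodupD : D.Nodup := ((PySem.List.sorted_perm C (fun x => x) true).symm).nodup (PySem.Set.nodup_ofList _)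
  have hpw : D.Pairwise (fun a b => b ≤ a) := PySem.List.sorted_pairwise_rev C (fun x => x)
  have hDgt : D.Pairwise (fun a b => b < a) :=
    (hpw.and hnodupD).imp (fun hab => lt_of_le_of_ne hab.1 (fun hba => hab.2 hba.symm))
  have hmemD : ∀ x ∈ S, cnt x ∈ D := by
    intro x hx
    rw [hDdef, PySem.List.mem_sorted, hCdef, PySem.Set.mem_ofList]
    exact List.mem_map_of_mem hx
  have hsorted : PySem.List.sorted S cnt true = D.flatMap (fun c => S.filter (fun x => cnt x == c)) :=
    pv_sorted_rev_eq_flatMap cnt D hDgt S hmemD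
  -- A's key function is cnt
  have hkeyA : (fun x => (PySem.Dict.counter flat).getD x 0) = cnt := by
    funext x
    rw [PySem.Dict.getD_counter]
  -- head_count agreement
  have hhead : (PySem.List.sorted (PySem.Dict.counter flat).keys (fun x => (PySem.Dict.counter flat).getD x 0) true).filter
        (fun item => (PySem.Dict.counter flat).getD item 0 ≥ n_sup)
      = (PySem.List.sorted buckets.keys (fun x => x) true).foldl
        (fun acc c => if c ≥ n_sup then acc ++ buckets.getD c [] else acc) [] := by
    rw [hkeys, PySem.List.foldl_ite_eq_foldl_filter, PySem.List.foldl_append_eq_flatMap]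
    simp only [hbkt]
    rw [List.nil_append, pv_filter_flatMap cnt n_sup S D, ← hsorted]
    rw [PySem.Dict.keys_counter, ← hSdef, hkeyA]
    simp only [PySem.Dict.getD_counter, hcntdef]
  rw [hhead]
  -- head_sort agreement: the range-index loop equals the enumerate loop
  set HC : List String := (PySem.List.sorted buckets.keys (fun x => x) true).foldl
      (fun acc c => if c ≥ n_sup then acc ++ buckets.getD c [] else acc) [] with hHCdef
  have hdict := pv_range_fold_eq_enum_fold HC HC.length 0 PySem.Dict.empty (by omega)
  rw [Nat.cast_zero] at hdict
  rw [List.drop_zero] at hdict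
  rw [hdict]
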